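-- pv_equiv track=rewrite | github.com/BerkeleyLearnVerify/Scenic | scenic_query.py | createCorrespondence
-- ===== SOURCE A (Python) =====
-- def createCorrespondence(correspondence, objType, objTypeOrder, objTypeCorrespondence):
--     index = 0
--     correspond_copy = correspondence.copy()
--     for i in range(len(objTypeOrder)):
--         if objTypeOrder[i] == objType:
--             correspond_copy[i] = objTypeCorrespondence[index]
--             index += 1
--             if index == len(objTypeCorrespondence):
--                 break
--     return correspond_copy
-- ===== SOURCE B (Python) =====
-- def createCorrespondence(correspondence, objType, objTypeOrder, objTypeCorrespondence):
--     pending = list(objTypeCorrespondence)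
--     out = []
--     for orig, t in zip(correspondence, objTypeOrder):
--         if pending and t == objType:
--             out.append(pending.pop(0))
--         else:
--             out.append(orig)
--     out.extend(correspondence[len(objTypeOrder):])
--     return out
-- ===== Notes on version B (the rewrite author's own statement) =====
-- stated objective: alternative
-- what changed: B rebuilds the result front-to-back by zipping correspondence with objTypeOrder and consuming the correspondence values as a queue (pop from the front when the type matches), instead of A's in-place index assignment into a copy driven by a counter with an early break; Pre_ excludes the inputs where A raises IndexError (objTypeCorrespondence empty while objType occurs, or an assigned position out of range).
import Mathlib
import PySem

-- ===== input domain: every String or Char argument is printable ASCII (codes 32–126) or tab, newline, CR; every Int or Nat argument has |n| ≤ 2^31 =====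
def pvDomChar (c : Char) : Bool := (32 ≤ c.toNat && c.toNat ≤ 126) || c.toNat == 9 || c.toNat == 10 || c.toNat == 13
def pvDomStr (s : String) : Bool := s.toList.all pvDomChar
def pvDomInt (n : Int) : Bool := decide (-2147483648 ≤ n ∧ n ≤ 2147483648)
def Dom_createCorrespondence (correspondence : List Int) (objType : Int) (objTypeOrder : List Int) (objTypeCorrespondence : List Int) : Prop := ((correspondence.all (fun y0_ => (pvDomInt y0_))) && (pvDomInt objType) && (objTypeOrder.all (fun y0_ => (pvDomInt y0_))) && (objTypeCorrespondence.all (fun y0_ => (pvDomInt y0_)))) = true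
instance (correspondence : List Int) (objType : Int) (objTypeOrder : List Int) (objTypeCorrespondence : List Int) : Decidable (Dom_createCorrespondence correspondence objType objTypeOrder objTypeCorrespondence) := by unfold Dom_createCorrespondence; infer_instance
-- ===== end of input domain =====

-- B rebuilds the result front-to-back by zipping correspondence with objTypeOrder and
-- consuming the correspondence values as a queue, instead of A's counter-driven in-place
-- index assignment with an early break (objective: alternative, same cost).

-- ===== PORT A =====
-- A's indexed for-loop over objTypeOrder with the running counter `index` and the
-- early break; the (value, position) stream order.zipIdx stands for `i, objTypeOrder[i]`.
-- List.set / List.getD are total where Python raises IndexError; those inputs are outside Pre_.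
def pvLoopA (objType : Int) (otc : List Int) : List (Int × Nat) → List Int → Nat → List Int
  | [], copy, _ => copy
  | (t, i) :: rest, copy, index =>
    if t == objType then
      let copy' := copy.set i (otc.getD index 0)
      if index + 1 == otc.length then copy'
      else pvLoopA objType otc rest copy' (index + 1)
    else pvLoopA objType otc rest copy index

def createCorrespondence (correspondence : List Int) (objType : Int) (objTypeOrder : List Int) (objTypeCorrespondence : List Int) : List Int :=
  pvLoopA objType objTypeCorrespondence objTypeOrder.zipIdx correspondence 0

-- ===== PORT B =====
-- Source B's loop `for orig, t in zip(correspondence, objTypeOrder): if pending and t == objType: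
-- out.append(pending.pop(0)) else out.append(orig)`; builds the output list directly.
def pvBuild (objType : Int) : List (Int × Int) → List Int → List Int
  | [], _ => []
  | (orig, t) :: rest, pending =>
    match pending with
    | v :: vs =>
      if t == objType then v :: pvBuild objType rest vs
      else orig :: pvBuild objType rest (v :: vs)
    | [] => orig :: pvBuild objType rest []

def createCorrespondence_alt (correspondence : List Int) (objType : Int) (objTypeOrder : List Int) (objTypeCorrespondence : List Int) : List Int :=
  pvBuild objType (correspondence.zip objTypeOrder) objTypeCorrespondence
    ++ correspondence.drop objTypeOrder.length

-- ===== PRECONDITION & SPEC =====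
-- Pre_ holds exactly where Python A returns: A raises IndexError when objTypeCorrespondence
-- is empty while objType occurs in objTypeOrder, or when an assigned matching position
-- (among the first len(objTypeCorrespondence) matches) is out of range of correspondence.
def Pre_createCorrespondence (correspondence : List Int) (objType : Int) (objTypeOrder : List Int) (objTypeCorrespondence : List Int) : Prop :=
  (objTypeOrder.zipIdx.filter (fun p => p.1 == objType)).map Prod.snd = [] ∨
    (objTypeCorrespondence ≠ [] ∧
      ∀ i ∈ ((objTypeOrder.zipIdx.filter (fun p => p.1 == objType)).map Prod.snd).take objTypeCorrespondence.length,
        i < correspondence.length)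
instance (correspondence : List Int) (objType : Int) (objTypeOrder : List Int) (objTypeCorrespondence : List Int) : Decidable (Pre_createCorrespondence correspondence objType objTypeOrder objTypeCorrespondence) := by unfold Pre_createCorrespondence; infer_instance

def pvWitness_createCorrespondence : List Int × Int × List Int × List Int := ([1, 2, 3], 5, [5, 9, 5], [7, 8])

def Spec_createCorrespondence (correspondence : List Int) (objType : Int) (objTypeOrder : List Int) (objTypeCorrespondence : List Int) (out : List Int) : Prop := out = createCorrespondence_alt correspondence objType objTypeOrder objTypeCorrespondence
instance (correspondence : List Int) (objType : Int) (objTypeOrder : List Int) (objTypeCorrespondence : List Int) (out : List Int) : Decidable (Spec_createCorrespondence correspondence objType objTypeOrder objTypeCorrespondence out) := by unfold Spec_createCorrespondence; infer_instance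

-- ===== CLAIM (what is proved, stated in full; the proofs are below) =====
def Claim_equal_createCorrespondence : Prop := ∀ (correspondence : List Int) (objType : Int) (objTypeOrder : List Int) (objTypeCorrespondence : List Int), Dom_createCorrespondence correspondence objType objTypeOrder objTypeCorrespondence → Pre_createCorrespondence correspondence objType objTypeOrder objTypeCorrespondence → Spec_createCorrespondence correspondence objType objTypeOrder objTypeCorrespondence (createCorrespondence correspondence objType objTypeOrder objTypeCorrespondence)

-- ===== LEMMAS AND PROOFS =====

lemma pvLoopA_nil (objType : Int) (otc : List Int) (copy : List Int) (index : Nat) :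
    pvLoopA objType otc [] copy index = copy := rfl

lemma pvLoopA_cons (objType t : Int) (otc : List Int) (i : Nat) (rest : List (Int × Nat))
    (copy : List Int) (index : Nat) :
    pvLoopA objType otc ((t, i) :: rest) copy index =
      if t == objType then
        (if index + 1 == otc.length then copy.set i (otc.getD index 0)
         else pvLoopA objType otc rest (copy.set i (otc.getD index 0)) (index + 1))
      else pvLoopA objType otc rest copy index := rfl

-- A's loop from counter `index` equals a fold assigning the matching positions (in order)
-- the remaining correspondence values, provided the counter is in range when a match remains.
lemma pvLoopA_eq (objType : Int) (otc : List Int) :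
    ∀ (ps : List (Int × Nat)) (copy : List Int) (index : Nat),
      ((ps.filter (fun p => p.1 == objType)) ≠ [] → index < otc.length) →
      pvLoopA objType otc ps copy index =
        (((ps.filter (fun p => p.1 == objType)).map Prod.snd).zip (otc.drop index)).foldl
          (fun acc p => acc.set p.1 p.2) copy := by
  intro ps
  induction ps with
  | nil => intro copy index _; simp [pvLoopA_nil]
  | cons hd rest ih =>
    intro copy index h
    obtain ⟨t, i⟩ := hd
    by_cases ht : (t == objType) = true
    · have hfil : ((t, i) :: rest).filter (fun p => p.1 == objType)
          = (t, i) :: rest.filter (fun p => p.1 == objType) := by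
        simp [ht]
      have hidx : index < otc.length := h (by simp [hfil])
      have hdrop : otc.drop index = otc[index] :: otc.drop (index + 1) :=
        List.drop_eq_getElem_cons hidx
      have hgd : otc.getD index 0 = otc[index] := by
        simp [List.getD, List.getElem?_eq_getElem hidx]
      by_cases hbrk : (index + 1 == otc.length) = true
      · have hlen : index + 1 = otc.length := by simpa using hbrk
        have hdrop2 : otc.drop (index + 1) = [] := by
          rw [hlen]; exact List.drop_length
        rw [pvLoopA_cons, if_pos ht, if_pos hbrk, hgd, hfil, List.map_cons, hdrop, hdrop2,
          List.zip_cons_cons, List.zip_nil_right, List.foldl_cons, List.foldl_nil]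
      · have hlt : index + 1 < otc.length := by
          have : ¬ index + 1 = otc.length := by simpa using hbrk
          omega
        rw [pvLoopA_cons, if_pos ht, if_neg hbrk]
        rw [ih _ (index + 1) (fun _ => hlt)]
        rw [hgd, hfil, List.map_cons, hdrop, List.zip_cons_cons, List.foldl_cons]
    · have hfil : ((t, i) :: rest).filter (fun p => p.1 == objType)
          = rest.filter (fun p => p.1 == objType) := by
        simp [ht]
      rw [pvLoopA_cons, if_neg ht]
      rw [ih _ index (fun hne => h (by simp [hfil, hne]))]
      rw [hfil]

-- the fold of set over the empty list is empty
lemma foldl_set_empty (pairs : List (Nat × Int)) :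
    pairs.foldl (fun (acc : List Int) p => acc.set p.1 p.2) [] = [] := by
  induction pairs with
  | nil => rfl
  | cons p rest ih => simpa [List.foldl_cons] using ih

-- setting only at indices shifted by one leaves the head alone
lemma foldl_set_shift (a : Int) (pairs : List (Nat × Int)) :
    ∀ (l : List Int),
      (pairs.map (fun p => (p.1 + 1, p.2))).foldl (fun (acc : List Int) p => acc.set p.1 p.2) (a :: l)
        = a :: pairs.foldl (fun (acc : List Int) p => acc.set p.1 p.2) l := by
  induction pairs with
  | nil => intro l; rfl
  | cons p rest ih =>
    intro l
    simp only [List.map_cons, List.foldl_cons, List.set_cons_succ]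
    exact ih _

lemma zip_map_shift (ms : List Nat) : ∀ (otc : List Int),
    (ms.map (fun i => i + 1)).zip otc = (ms.zip otc).map (fun p => (p.1 + 1, p.2)) := by
  induction ms with
  | nil => intro otc; simp
  | cons m rest ih =>
    intro otc
    cases otc with
    | nil => simp
    | cons v vs => simp [ih vs]

-- indices of matches in the stream start one later when the offset starts one later
lemma matches_shift (objType : Int) (l : List Int) :
    ((l.zipIdx 1).filter (fun p => p.1 == objType)).map Prod.snd
      = (((l.zipIdx).filter (fun p => p.1 == objType)).map Prod.snd).map (fun i => i + 1) := by
  rw [show (1 : Nat) = 0 + 1 from rfl, List.zipIdx_succ]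
  simp [List.filter_map, List.map_map, Function.comp_def]

lemma pvBuild_pending_nil (objType : Int) (ps : List (Int × Int)) :
    pvBuild objType ps [] = ps.map Prod.fst := by
  induction ps with
  | nil => rfl
  | cons p rest ih => obtain ⟨orig, t⟩ := p; simp [pvBuild, ih]

lemma map_fst_zip_take (c : List Int) : ∀ (l : List Int),
    (c.zip l).map Prod.fst = c.take l.length := by
  induction c with
  | nil => intro l; simp
  | cons x c' ih =>
    intro l
    cases l with
    | nil => simp
    | cons t rest => simp [ih rest]

lemma fst_mem_take_of_mem_zip {p : Nat × Int} : ∀ (l : List Nat) (l' : List Int),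
    p ∈ l.zip l' → p.1 ∈ l.take l'.length := by
  intro l
  induction l with
  | nil => intro l' h; simp at h
  | cons a t ih =>
    intro l' h
    cases l' with
    | nil => simp at h
    | cons b t' =>
      simp only [List.zip_cons_cons, List.mem_cons] at h
      rcases h with h | h
      · simp [h]
      · simp [List.take_succ_cons, ih t' h]

-- the assignment fold equals B's rebuild, when every assigned index is in range
lemma foldl_eq_build (objType : Int) :
    ∀ (order c otc : List Int),
      (∀ p ∈ ((((order.zipIdx).filter (fun p => p.1 == objType)).map Prod.snd).zip otc), p.1 < c.length) →
      ((((order.zipIdx).filter (fun p => p.1 == objType)).map Prod.snd).zip otc).foldl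
          (fun acc p => acc.set p.1 p.2) c
        = pvBuild objType (c.zip order) otc ++ c.drop order.length := by
  intro order
  induction order with
  | nil => intro c otc _; simp [pvBuild]
  | cons t rest ih =>
    intro c otc hrange
    have hcons : (t :: rest).zipIdx = (t, 0) :: rest.zipIdx 1 := by
      simp [List.zipIdx_cons]
    cases c with
    | nil =>
      rw [foldl_set_empty]
      simp [pvBuild]
    | cons x c' =>
      by_cases ht : (t == objType) = true
      · cases otc with
        | nil =>
          simp only [List.zip_nil_right, List.foldl_nil]
          rw [pvBuild_pending_nil, map_fst_zip_take]
          exact (List.take_append_drop _ _).symm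
        | cons v vs =>
          have hmatch : (((t :: rest).zipIdx.filter (fun p => p.1 == objType)).map Prod.snd)
              = 0 :: ((((rest.zipIdx).filter (fun p => p.1 == objType)).map Prod.snd).map (fun i => i + 1)) := by
            rw [hcons]
            simp [ht, matches_shift]
          rw [hmatch] at hrange ⊢
          rw [List.zip_cons_cons, List.foldl_cons]
          have hset : (x :: c').set 0 v = v :: c' := rfl
          rw [hset, zip_map_shift, foldl_set_shift]
          have hr : ∀ p ∈ ((((rest.zipIdx).filter (fun p => p.1 == objType)).map Prod.snd).zip vs), p.1 < c'.length := by
            intro p hp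
            have h2 : ((p.1 + 1, p.2) : Nat × Int) ∈
                ((((rest.zipIdx).filter (fun p => p.1 == objType)).map Prod.snd).map (fun i => i + 1)).zip vs := by
              rw [zip_map_shift]
              exact List.mem_map_of_mem hp
            have := hrange _ (List.mem_cons_of_mem _ h2)
            simpa using this
          rw [ih c' vs hr]
          simp [pvBuild, ht]
      · have hmatch : (((t :: rest).zipIdx.filter (fun p => p.1 == objType)).map Prod.snd)
            = ((((rest.zipIdx).filter (fun p => p.1 == objType)).map Prod.snd).map (fun i => i + 1)) := by
          rw [hcons]
          simp [ht, matches_shift]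
        rw [hmatch] at hrange ⊢
        rw [zip_map_shift, foldl_set_shift]
        have hr : ∀ p ∈ ((((rest.zipIdx).filter (fun p => p.1 == objType)).map Prod.snd).zip otc), p.1 < c'.length := by
          intro p hp
          have h2 := hrange (p.1 + 1, p.2) (by rw [zip_map_shift]; exact List.mem_map_of_mem hp)
          simpa using h2
        rw [ih c' otc hr]
        cases otc with
        | nil => simp [pvBuild]
        | cons v vs => simp [pvBuild, ht]

-- ===== VERDICT (by name: the statement is the Claim_ definition above) =====
theorem createCorrespondence_spec : Claim_equal_createCorrespondence := by
  intro c objType order otc _ hpre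
  unfold Spec_createCorrespondence createCorrespondence createCorrespondence_alt
  have h0 : (order.zipIdx.filter (fun p => p.1 == objType)) ≠ [] → 0 < otc.length := by
    intro hne
    rcases hpre with hnil | ⟨hotc, _⟩
    · exact absurd (List.map_eq_nil_iff.mp hnil) hne
    · exact List.length_pos_of_ne_nil hotc
  rw [pvLoopA_eq objType otc order.zipIdx c 0 h0]
  have hrange : ∀ p ∈ ((((order.zipIdx).filter (fun p => p.1 == objType)).map Prod.snd).zip otc), p.1 < c.length := by
    intro p hp
    rcases hpre with hnil | ⟨_, hin⟩
    · rw [hnil] at hp; simp at hp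
    · exact hin p.1 (fst_mem_take_of_mem_zip _ _ hp)
  simpa using foldl_eq_build objType order c otc hrange
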